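-- pv_equiv track=rewrite | github.com/akashrajk54/bit | qs4 -  Smallest XOR.py | solve
-- ===== SOURCE A (Python) =====
-- def solve(A, B):
--     x = 0
--     for i in range(30, -1, -1):
--         is_set = ((A & (1 << i)) > 0)
--         if is_set:
--             if B > 0:
--                 x = x | (1 << i)
--                 B -= 1
--             else:
--                 break
--
--     bit = 0
--     while B > 0:
--         is_set = ((x & (1 << bit)) > 0)
--         if not is_set:
--             x = x | (1 << bit)
--             B = B-1
--         bit += 1
--     return x
-- ===== SOURCE B (Python) =====
-- def solve(A, B):
--     # integer bit-trick version: mask to 31 bits, strip lowest set bits or fill lowest zero bits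
--     a = A & ((1 << 31) - 1)
--     c = a.bit_count()
--     if c >= B:
--         # remove the lowest c - max(B, 0) set bits, keeping the top B set bits
--         for _ in range(c - max(B, 0)):
--             a &= a - 1
--         return a
--     x = a
--     for _ in range(B - c):
--         y = x + 1
--         x |= y - (y & x)   # y - (y & x) is the lowest set bit of x+1 = lowest zero bit of x
--     return x
-- ===== Notes on version B (the rewrite author's own statement) =====
-- stated objective: alternative
-- what changed: Instead of scanning fixed bit indices 30..0 (and then scanning upward for zero bits), B masks A to 31 bits, counts its set bits once, and then works on the integer directly: it strips the lowest set bit (a &= a-1) c-max(B,0) times when there are enough set bits, or repeatedly sets the lowest zero bit via y=x+1; x |= y-(y&x) when bits must be added.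
import Mathlib
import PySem

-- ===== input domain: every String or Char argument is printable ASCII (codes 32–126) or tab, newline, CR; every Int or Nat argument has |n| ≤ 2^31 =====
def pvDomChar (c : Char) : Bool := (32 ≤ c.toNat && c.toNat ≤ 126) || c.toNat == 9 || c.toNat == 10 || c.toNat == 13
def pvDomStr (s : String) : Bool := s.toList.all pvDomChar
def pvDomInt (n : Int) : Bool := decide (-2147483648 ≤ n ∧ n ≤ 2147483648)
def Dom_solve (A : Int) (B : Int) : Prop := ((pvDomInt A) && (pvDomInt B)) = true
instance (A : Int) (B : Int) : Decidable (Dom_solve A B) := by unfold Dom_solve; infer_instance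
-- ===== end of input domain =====

-- B re-implements 'keep the top B set bits of A&0x7fffffff, then fill lowest zero bits' by direct
-- integer bit tricks (strip the lowest set bit / set the lowest zero bit) instead of scanning bit
-- indices 30..0 one by one (objective: alternative algorithm, same exact results).

-- ===== PORT A =====
-- 'for i in range(30,-1,-1)' with break: recursion over the index list; every i in the list is ≥ 0, so i.toNat is exact
def solveLoop1 (A : Int) : List Int → Int → Int → Int × Int
  | [], x, B => (x, B)
  | i :: rest, x, B =>
    if 0 < PySem.Int.band A ((1 : Int) <<< i.toNat) then
      if 0 < B then solveLoop1 A rest (PySem.Int.bor x ((1 : Int) <<< i.toNat)) (B - 1)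
      else (x, B)
    else solveLoop1 A rest x B

-- 'while B > 0': the fuel argument only makes the recursion structural (the fuel passed by 'solve' is proved sufficient below); bit stays ≥ 0, so bit.toNat is exact
def solveLoop2 : Nat → Int → Int → Int → Int
  | 0, x, _, _ => x
  | fuel + 1, x, B, bit =>
    if 0 < B then
      if 0 < PySem.Int.band x ((1 : Int) <<< bit.toNat) then solveLoop2 fuel x B (bit + 1)
      else solveLoop2 fuel (PySem.Int.bor x ((1 : Int) <<< bit.toNat)) (B - 1) (bit + 1)
    else x

def solve (A : Int) (B : Int) : Int :=
  let p := solveLoop1 A (PySem.List.pyRange 30 (-1) (-1)) 0 B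
  solveLoop2 (p.2.toNat + 31) p.1 p.2 0

-- ===== PORT B =====
-- 'for _ in range(k): a &= a - 1'
def altStrip : Nat → Int → Int
  | 0, a => a
  | k + 1, a => altStrip k (PySem.Int.band a (a - 1))

-- 'for _ in range(k): y = x + 1; x |= y - (y & x)'
def altFill : Nat → Int → Int
  | 0, x => x
  | k + 1, x => altFill k (PySem.Int.bor x ((x + 1) - PySem.Int.band (x + 1) x))

def solve_alt (A : Int) (B : Int) : Int :=
  let a := PySem.Int.band A (((1 : Int) <<< (31:Nat)) - 1)
  let c : Int := PySem.Int.bitCount a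
  if B ≤ c then altStrip (c - max B 0).toNat a   -- 'if c >= B': range(c - max(B, 0)) runs (c - max B 0).toNat times
  else altFill (B - c).toNat a                   -- range(B - c)

-- ===== PRECONDITION & SPEC =====
def Spec_solve (A : Int) (B : Int) (out : Int) : Prop := out = solve_alt A B
instance (A : Int) (B : Int) (out : Int) : Decidable (Spec_solve A B out) := by unfold Spec_solve; infer_instance

-- ===== CLAIM (what is proved, stated in full; the proofs are below) =====
def Claim_equal_solve : Prop := ∀ (A : Int) (B : Int), Dom_solve A B → Spec_solve A B (solve A B)

-- ===== LEMMAS AND PROOFS =====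

-- Nat-level helpers used only by the proofs
def popc : Nat → Nat
  | 0 => 0
  | n + 1 => (n + 1) % 2 + popc ((n + 1) / 2)
decreasing_by omega
def sz : Nat → Nat
  | 0 => 0
  | n + 1 => sz ((n + 1) / 2) + 1
decreasing_by omega
def lowZ (n : Nat) : Nat := if n % 2 = 0 then 0 else lowZ (n / 2) + 1
decreasing_by omega
def lowS (n : Nat) : Nat := if n % 2 = 1 ∨ n = 0 then 0 else lowS (n / 2) + 1
decreasing_by omega
def keep (n : Nat) : Nat → Int → Nat × Int
  | 0, B => (0, B)
  | i + 1, B =>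
    if n.testBit i then
      if 0 < B then
        let p := keep n i (B - 1)
        (2 ^ i + p.1, p.2)
      else (0, B)
    else keep n i B
def stripN : Nat → Nat → Nat
  | 0, m => m
  | k + 1, m => stripN k (m &&& (m - 1))
def fillN : Nat → Nat → Nat
  | 0, x => x
  | k + 1, x => fillN k (x + 2 ^ lowZ x)
def rlist : Nat → List Int
  | 0 => []
  | i + 1 => (i : Int) :: rlist i

theorem and_rec (a b : Nat) :
    a &&& b = 2 * (a / 2 &&& b / 2) + (if a % 2 = 1 ∧ b % 2 = 1 then 1 else 0) := by
  apply Nat.eq_of_testBit_eq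
  intro i
  cases i with
  | zero =>
    simp only [Nat.testBit_zero, Nat.testBit_and]
    rcases Nat.mod_two_eq_zero_or_one a with h1 | h1 <;> rcases Nat.mod_two_eq_zero_or_one b with h2 | h2 <;>
      simp [h1, h2, Nat.testBit_zero, Nat.mul_add_mod, Nat.add_mul_mod_self_left]
  | succ i =>
    have h2 : (2 * (a / 2 &&& b / 2) + (if a % 2 = 1 ∧ b % 2 = 1 then 1 else 0)) / 2 = a / 2 &&& b / 2 := by
      split <;> omega
    rw [Nat.testBit_succ, Nat.testBit_succ, h2, ← Nat.testBit_succ, Nat.testBit_and,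
      Nat.testBit_and, Nat.testBit_succ, Nat.testBit_succ]

theorem or_rec (a b : Nat) :
    a ||| b = 2 * (a / 2 ||| b / 2) + (if a % 2 = 1 ∨ b % 2 = 1 then 1 else 0) := by
  apply Nat.eq_of_testBit_eq
  intro i
  cases i with
  | zero =>
    simp only [Nat.testBit_zero, Nat.testBit_or]
    rcases Nat.mod_two_eq_zero_or_one a with h1 | h1 <;> rcases Nat.mod_two_eq_zero_or_one b with h2 | h2 <;>
      simp [h1, h2, Nat.testBit_zero, Nat.mul_add_mod, Nat.add_mul_mod_self_left]
  | succ i =>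
    have h2 : (2 * (a / 2 ||| b / 2) + (if a % 2 = 1 ∨ b % 2 = 1 then 1 else 0)) / 2 = a / 2 ||| b / 2 := by
      split <;> omega
    rw [Nat.testBit_succ, Nat.testBit_succ, h2, ← Nat.testBit_succ, Nat.testBit_or,
      Nat.testBit_or, Nat.testBit_succ, Nat.testBit_succ]

theorem popc_eq (n : Nat) : popc n = n % 2 + popc (n / 2) := by
  cases n with
  | zero => simp [popc]
  | succ n => rw [popc]

theorem mod_pow_split (n i : Nat) : n % 2 ^ (i + 1) = n % 2 + 2 * (n / 2 % 2 ^ i) := by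
  have : (2 : Nat) ^ (i + 1) = 2 * 2 ^ i := by ring
  rw [this, Nat.mod_mul]

theorem popc_split (n i : Nat) : popc (n % 2 ^ (i + 1)) = n % 2 + popc (n / 2 % 2 ^ i) := by
  rw [mod_pow_split, popc_eq]
  have h1 : (n % 2 + 2 * (n / 2 % 2 ^ i)) % 2 = n % 2 := by omega
  have h2 : (n % 2 + 2 * (n / 2 % 2 ^ i)) / 2 = n / 2 % 2 ^ i := by omega
  rw [h1, h2]

theorem pcl_succ (n i : Nat) : popc (n % 2 ^ (i + 1)) = popc (n % 2 ^ i) + (n.testBit i).toNat := by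
  induction i generalizing n with
  | zero =>
    rw [popc_split]
    simp only [pow_zero, Nat.mod_one, Nat.testBit_zero]
    rcases Nat.mod_two_eq_zero_or_one n with h | h <;> simp [h, popc]
  | succ i ih =>
    rw [popc_split n (i+1), ih (n/2), Nat.testBit_succ n, popc_split n i]; ring

theorem bitCount_cast (m : Nat) : PySem.Int.bitCount (m : Int) = popc m := by
  induction m using Nat.strong_induction_on with
  | _ m ih =>
    cases m with
    | zero => simpa [popc] using PySem.Int.bitCount_natCast_zero
    | succ m =>
      rw [PySem.Int.bitCount_natCast (by omega), popc_eq]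
      rw [ih ((m + 1) / 2) (by omega)]

theorem shl1 (j : Nat) : (1 : Int) <<< j = ((2 ^ j : Nat) : Int) := by
  show Int.shiftLeft 1 j = _
  simp [Int.shiftLeft, Nat.one_shiftLeft]

theorem flipBit : ∀ (k : Nat) (x j : Nat), x < 2 ^ k → j < k →
    (2 ^ k - 1 - x).testBit j = !x.testBit j := by
  intro k
  induction k with
  | zero => omega
  | succ k ih =>
    intro x j hx hj
    have hP : (0:Nat) < 2 ^ k := Nat.two_pow_pos _
    have h2 : (2:Nat) ^ (k + 1) = 2 * 2 ^ k := by ring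
    cases j with
    | zero =>
      simp only [Nat.testBit_zero]
      have : (2 ^ (k + 1) - 1 - x) % 2 = 1 - x % 2 := by omega
      rw [this]
      rcases Nat.mod_two_eq_zero_or_one x with h | h <;> simp [h]
    | succ j =>
      rw [Nat.testBit_succ, Nat.testBit_succ]
      have : (2 ^ (k + 1) - 1 - x) / 2 = 2 ^ k - 1 - x / 2 := by omega
      rw [this]
      exact ih (x / 2) j (by omega) (by omega)

theorem mask_eq (A : Int) : PySem.Int.band A (((1 : Int) <<< (31:Nat)) - 1) = (((A % 2147483648).toNat : Nat) : Int) := by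
  have hb : ((1 : Int) <<< (31:Nat)) - 1 = ((2147483647 : Nat) : Int) := by rw [shl1]; norm_num
  rw [hb, PySem.Int.band.eq_1]
  have h1 : ((2147483647 : Nat) : Int).toNat = 2 ^ 31 - 1 := by rfl
  by_cases hA : (0:Int) ≤ A
  · rw [if_pos hA, if_pos (by norm_num), h1, Nat.and_two_pow_sub_one_eq_mod]
    omega
  · rw [if_neg hA, if_pos (by norm_num), h1, Nat.and_comm, Nat.and_two_pow_sub_one_eq_mod]
    omega

theorem bitA (A : Int) (j : Nat) (hj : j < 31) :
    (0 < PySem.Int.band A ((1 : Int) <<< j)) ↔ ((A % 2147483648).toNat).testBit j := by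
  rw [shl1, PySem.Int.band.eq_1]
  have hp : (0:Int) ≤ ((2 ^ j : Nat) : Int) := Int.natCast_nonneg _
  have htn : ((2 ^ j : Nat) : Int).toNat = 2 ^ j := Int.toNat_natCast _
  have hpow : (0:Nat) < 2 ^ j := Nat.two_pow_pos _
  by_cases hA : (0:Int) ≤ A
  · rw [if_pos hA, if_pos hp, htn, Nat.and_two_pow]
    have hm : (A % 2147483648).toNat = A.toNat % 2 ^ 31 := by omega
    rw [hm, Nat.testBit_mod_two_pow]
    cases h : A.toNat.testBit j <;> simp [h, hj] <;> omega
  · rw [if_neg hA, if_pos hp, htn, Nat.and_comm, Nat.and_two_pow]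
    have hm : (A % 2147483648).toNat = 2 ^ 31 - 1 - ((-A - 1).toNat % 2 ^ 31) := by omega
    have hx : (-A - 1).toNat % 2 ^ 31 < 2 ^ 31 := Nat.mod_lt _ (by norm_num)
    rw [hm, flipBit 31 _ j hx hj, Nat.testBit_mod_two_pow]
    cases h : (-A - 1).toNat.testBit j <;> simp [h, hj] <;> omega

theorem or_pow : ∀ (j x : Nat), ¬ x.testBit j → x ||| 2 ^ j = x + 2 ^ j := by
  intro j
  induction j with
  | zero =>
    intro x h
    simp only [Nat.testBit_zero] at h
    rw [or_rec]
    simp only [pow_zero]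
    have hx : ¬ x % 2 = 1 := by simpa using h
    have h12 : (1:Nat) / 2 = 0 := rfl
    rw [h12, Nat.or_zero, if_pos (by omega)]
    omega
  | succ j ih =>
    intro x h
    rw [Nat.testBit_succ] at h
    rw [or_rec]
    have h1 : (2:Nat) ^ (j + 1) % 2 = 0 := by
      have : (2:Nat) ^ (j + 1) = 2 * 2 ^ j := by ring
      omega
    have h2 : (2:Nat) ^ (j + 1) / 2 = 2 ^ j := by
      have : (2:Nat) ^ (j + 1) = 2 * 2 ^ j := by ring
      omega
    rw [h1, h2, ih (x / 2) h]
    have : (2:Nat) ^ (j + 1) = 2 * 2 ^ j := by ring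
    rcases Nat.mod_two_eq_zero_or_one x with hx | hx <;> simp [hx] <;> omega

theorem lowZ_eq0 {n : Nat} (h : n % 2 = 0) : lowZ n = 0 := by rw [lowZ, if_pos h]
theorem lowZ_succ {n : Nat} (h : n % 2 = 1) : lowZ n = lowZ (n / 2) + 1 := by
  rw [lowZ, if_neg (by omega)]
theorem lowS_eq0 {n : Nat} (h : n % 2 = 1) : lowS n = 0 := by rw [lowS, if_pos (Or.inl h)]
theorem lowS_succ {n : Nat} (h : n % 2 = 0) (h2 : n ≠ 0) : lowS n = lowS (n / 2) + 1 := by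
  rw [lowS, if_neg (by omega)]

theorem lowS_spec : ∀ n : Nat, 0 < n → n.testBit (lowS n) ∧ n % 2 ^ lowS n = 0 := by
  intro n
  induction n using Nat.strong_induction_on with
  | _ n ih =>
    intro hn
    rcases Nat.mod_two_eq_zero_or_one n with h | h
    · rw [lowS_succ h (by omega)]
      obtain ⟨h1, h2⟩ := ih (n / 2) (by omega) (by omega)
      constructor
      · rwa [Nat.testBit_succ]
      · have hmm : (2:Nat) ^ (lowS (n / 2) + 1) = 2 * 2 ^ lowS (n / 2) := by ring
        rw [hmm, Nat.mod_mul]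
        omega
    · rw [lowS_eq0 h]
      simp [Nat.testBit_zero, h, Nat.mod_one]

theorem strip1 : ∀ n : Nat, 0 < n → n &&& (n - 1) = n - 2 ^ lowS n := by
  intro n
  induction n using Nat.strong_induction_on with
  | _ n ih =>
    intro hn
    rcases Nat.mod_two_eq_zero_or_one n with h | h
    · rw [lowS_succ h (by omega), and_rec]
      have h1 : (n - 1) % 2 = 1 := by omega
      have h2 : (n - 1) / 2 = n / 2 - 1 := by omega
      rw [if_neg (by omega), h2, ih (n / 2) (by omega) (by omega)]
      have h3 : n / 2 ≥ 2 ^ lowS (n / 2) := by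
        have := Nat.ge_two_pow_of_testBit (lowS_spec (n / 2) (by omega)).1
        omega
      have h4 : (2:Nat) ^ (lowS (n / 2) + 1) = 2 * 2 ^ lowS (n / 2) := by ring
      omega
    · rw [lowS_eq0 h, and_rec]
      have h1 : (n - 1) % 2 = 0 := by omega
      have h2 : (n - 1) / 2 = n / 2 := by omega
      rw [if_neg (by omega), h2, Nat.and_self]
      omega

theorem popc_sub_low : ∀ n : Nat, 0 < n → popc (n - 2 ^ lowS n) = popc n - 1 ∧ 0 < popc n := by
  intro n
  induction n using Nat.strong_induction_on with
  | _ n ih =>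
    intro hn
    rcases Nat.mod_two_eq_zero_or_one n with h | h
    · rw [lowS_succ h (by omega)]
      obtain ⟨h1, h2⟩ := ih (n / 2) (by omega) (by omega)
      have h3 : n / 2 ≥ 2 ^ lowS (n / 2) := by
        have := Nat.ge_two_pow_of_testBit (lowS_spec (n / 2) (by omega)).1
        omega
      have h4 : (2:Nat) ^ (lowS (n / 2) + 1) = 2 * 2 ^ lowS (n / 2) := by ring
      have h5 : n - 2 ^ (lowS (n / 2) + 1) = 2 * (n / 2 - 2 ^ lowS (n / 2)) := by omega
      rw [h5, popc_eq, popc_eq n]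
      have h6 : 2 * (n / 2 - 2 ^ lowS (n / 2)) % 2 = 0 := by omega
      have h7 : 2 * (n / 2 - 2 ^ lowS (n / 2)) / 2 = n / 2 - 2 ^ lowS (n / 2) := by omega
      rw [h6, h7, h1]
      omega
    · rw [lowS_eq0 h]
      have h5 : n - 2 ^ 0 = 2 * (n / 2) := by omega
      rw [h5, popc_eq, popc_eq n]
      have h6 : 2 * (n / 2) % 2 = 0 := by omega
      have h7 : 2 * (n / 2) / 2 = n / 2 := by omega
      rw [h6, h7, h]
      omega

theorem fillstep : ∀ x : Nat, x ||| ((x + 1) - ((x + 1) &&& x)) = x + 2 ^ lowZ x := by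
  intro x
  induction x using Nat.strong_induction_on with
  | _ x ih =>
    rcases Nat.mod_two_eq_zero_or_one x with h | h
    · -- x even: (x+1) & x = x, so the or-term is 1
      have h1 : (x + 1) &&& x = x := by
        rw [and_rec]
        have e1 : (x + 1) % 2 = 1 := by omega
        have e2 : (x + 1) / 2 = x / 2 := by omega
        rw [if_neg (by omega), e2, Nat.and_self]
        omega
      rw [h1, lowZ_eq0 h]
      have h2 : x + 1 - x = 1 := by omega
      rw [h2, or_rec]
      have h3 : (1:Nat) / 2 = 0 := rfl
      rw [h3, Nat.or_zero, if_pos (by omega)]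
      omega
    · -- x odd
      have e1 : (x + 1) % 2 = 0 := by omega
      have e2 : (x + 1) / 2 = x / 2 + 1 := by omega
      have h1 : (x + 1) &&& x = 2 * ((x / 2 + 1) &&& (x / 2)) := by
        rw [and_rec, if_neg (by omega), e2]
        omega
      have hle : (x / 2 + 1) &&& (x / 2) ≤ x / 2 + 1 := Nat.and_le_left
      have h2 : (x + 1) - ((x + 1) &&& x) = 2 * ((x / 2 + 1) - ((x / 2 + 1) &&& (x / 2))) := by omega
      rw [h2, or_rec]
      have e3 : 2 * (x / 2 + 1 - (x / 2 + 1 &&& x / 2)) % 2 = 0 := by omega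
      have e4 : 2 * (x / 2 + 1 - (x / 2 + 1 &&& x / 2)) / 2 = x / 2 + 1 - (x / 2 + 1 &&& x / 2) := by omega
      rw [e3, e4, if_pos (by omega), ih (x / 2) (by omega), lowZ_succ h]
      have h4 : (2:Nat) ^ (lowZ (x / 2) + 1) = 2 * 2 ^ lowZ (x / 2) := by ring
      omega

theorem mod_two_pow_succ (n i : Nat) : n % 2 ^ (i + 1) = n % 2 ^ i + 2 ^ i * (n / 2 ^ i % 2) := by
  have h : (2:Nat) ^ (i + 1) = 2 ^ i * 2 := by ring
  rw [h, Nat.mod_mul]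

theorem popc_zero : popc 0 = 0 := by simp [popc]

theorem mod_pow_of_succ {n i : Nat} (h : n % 2 ^ (i + 1) = 0) : n % 2 ^ i = 0 := by
  have := mod_two_pow_succ n i
  omega

theorem testBit_of_mod {n i : Nat} (h : n % 2 ^ (i + 1) = 0) : n.testBit i = false := by
  rw [Nat.testBit_eq_decide_div_mod_eq]
  have e := mod_two_pow_succ n i
  have h2 : (0:Nat) < 2 ^ i := Nat.two_pow_pos _
  rcases Nat.mod_two_eq_zero_or_one (n / 2 ^ i) with ht | ht
  · simp [ht]
  · rw [ht, mul_one] at e; omega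

theorem testBit_true_mod {n i : Nat} (h : n.testBit i = true) :
    n % 2 ^ (i + 1) = n % 2 ^ i + 2 ^ i := by
  have e := mod_two_pow_succ n i
  rw [Nat.testBit_eq_decide_div_mod_eq] at h
  simp only [decide_eq_true_eq] at h
  rw [h, mul_one] at e; exact e

theorem testBit_false_mod {n i : Nat} (h : n.testBit i = false) :
    n % 2 ^ (i + 1) = n % 2 ^ i := by
  have e := mod_two_pow_succ n i
  rw [Nat.testBit_eq_decide_div_mod_eq] at h
  simp only [decide_eq_false_iff_not] at h
  have : n / 2 ^ i % 2 = 0 := by omega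
  rw [this, mul_zero] at e; omega

theorem keep_nonpos (n : Nat) : ∀ (i : Nat) (B : Int), B ≤ 0 → (keep n i B).1 = 0 := by
  intro i
  induction i with
  | zero => intro B _; rfl
  | succ i ih =>
    intro B hB
    rw [keep]
    by_cases h : n.testBit i
    · rw [if_pos h, if_neg (by omega)]
    · rw [if_neg h]; exact ih B hB

theorem keep_zero_bits (n : Nat) : ∀ (i : Nat) (B : Int), n % 2 ^ i = 0 → keep n i B = (0, B) := by
  intro i
  induction i with
  | zero => intro B _; rfl
  | succ i ih =>
    intro B h
    rw [keep, testBit_of_mod h]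
    simp only [Bool.false_eq_true, if_false]
    exact ih B (mod_pow_of_succ h)

theorem keep_ge (n : Nat) : ∀ (i : Nat) (B : Int), (popc (n % 2 ^ i) : Int) ≤ B →
    keep n i B = (n % 2 ^ i, B - popc (n % 2 ^ i)) := by
  intro i
  induction i with
  | zero => intro B _; simp [keep, Nat.mod_one, popc_zero]
  | succ i ih =>
    intro B h
    rw [keep]
    have hs := pcl_succ n i
    by_cases hb : n.testBit i
    · rw [hs, hb] at h
      simp only [Bool.toNat_true] at h
      push_cast at h
      rw [if_pos hb, if_pos (by omega), ih (B - 1) (by omega)]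
      have hmod := testBit_true_mod hb
      rw [hs, hb]
      simp only [Bool.toNat_true, Prod.mk.injEq]
      constructor
      · omega
      · push_cast; ring
    · have hb' : n.testBit i = false := by simpa using hb
      rw [hs, hb'] at h
      simp only [Bool.toNat_false, Nat.add_zero] at h
      rw [if_neg hb, ih B h, hs, hb', testBit_false_mod hb']
      simp

theorem keep_snd_le (n : Nat) : ∀ (i : Nat) (B : Int), B ≤ (popc (n % 2 ^ i) : Int) →
    (keep n i B).2 ≤ 0 := by
  intro i
  induction i with
  | zero =>
    intro B h; rw [keep]; simpa [Nat.mod_one, popc_zero] using h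
  | succ i ih =>
    intro B h
    have hs := pcl_succ n i
    rw [keep]
    by_cases hb : n.testBit i
    · rw [hs, hb] at h
      simp only [Bool.toNat_true] at h
      push_cast at h
      rw [if_pos hb]
      by_cases hB : 0 < B
      · rw [if_pos hB]
        exact ih (B - 1) (by push_cast; omega)
      · rw [if_neg hB]; simpa using hB
    · have hb' : n.testBit i = false := by simpa using hb
      rw [hs, hb'] at h
      simp only [Bool.toNat_false, Nat.add_zero] at h
      rw [if_neg hb]
      exact ih B h

theorem testBit_high (q r z t : Nat) (hr : r < 2 ^ (z + 1)) :
    (2 ^ (z + 1) * q + r).testBit (z + 1 + t) = q.testBit t := by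
  rw [Nat.testBit_eq_decide_div_mod_eq, Nat.testBit_eq_decide_div_mod_eq]
  have hp : (2:Nat) ^ (z + 1 + t) = 2 ^ (z + 1) * 2 ^ t := by rw [pow_add]
  rw [hp, ← Nat.div_div_eq_div_mul]
  have h1 : (2 ^ (z + 1) * q + r) / 2 ^ (z + 1) = q := by
    rw [Nat.mul_add_div (Nat.two_pow_pos _), Nat.div_eq_of_lt hr, Nat.add_zero]
  rw [h1]

theorem testBit_sub {n z : Nat} (h : n.testBit z = true) :
    ∀ j, (n - 2 ^ z).testBit j = (decide (j ≠ z) && n.testBit j) := by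
  intro j
  have hm := testBit_true_mod h
  have hdm := Nat.div_add_mod n (2 ^ (z + 1))
  set q := n / 2 ^ (z + 1) with hq
  set r := n % 2 ^ z with hr
  have hrlt : r < 2 ^ z := Nat.mod_lt _ (Nat.two_pow_pos _)
  have hsub : n - 2 ^ z = 2 ^ (z + 1) * q + r := by omega
  rcases Nat.lt_trichotomy j z with hj | hj | hj
  · have hd : (decide (j ≠ z) && n.testBit j) = n.testBit j := by
      simp [Nat.ne_of_lt hj]
    rw [hd]
    have e1 : (n - 2 ^ z).testBit j = ((n - 2 ^ z) % 2 ^ (j + 1)).testBit j := by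
      rw [Nat.testBit_mod_two_pow]; simp
    have e2 : n.testBit j = (n % 2 ^ (j + 1)).testBit j := by
      rw [Nat.testBit_mod_two_pow]; simp
    have hz : (2:Nat) ^ z = 2 ^ (j + 1) * 2 ^ (z - j - 1) := by
      rw [← pow_add]; congr 1; omega
    have hsplit : n = (n - 2 ^ z) + 2 ^ (j + 1) * 2 ^ (z - j - 1) := by
      have : (2:Nat) ^ z ≤ n := Nat.ge_two_pow_of_testBit h
      omega
    have key : n % 2 ^ (j + 1) = (n - 2 ^ z) % 2 ^ (j + 1) := by
      conv_lhs => rw [hsplit]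
      rw [Nat.add_mul_mod_self_left]
    rw [e1, e2, key]
  · subst hj
    simp only [ne_eq, not_true_eq_false, decide_false, Bool.false_and]
    rw [hsub, Nat.testBit_eq_decide_div_mod_eq]
    have h1 : (2:Nat) ^ (j + 1) = 2 ^ j * 2 := by ring
    have h2 : (2 ^ (j + 1) * q + r) / 2 ^ j = 2 * q := by
      have e : (2:Nat) ^ (j + 1) * q = 2 ^ j * (2 * q) := by ring
      rw [e, Nat.mul_add_div (Nat.two_pow_pos _), Nat.div_eq_of_lt hrlt, Nat.add_zero]
    rw [h2]
    simp [Nat.mul_mod_right]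
  · have hd : (decide (j ≠ z) && n.testBit j) = n.testBit j := by
      simp [Nat.ne_of_gt hj]
    rw [hd]
    obtain ⟨t, ht⟩ : ∃ t, j = z + 1 + t := ⟨j - z - 1, by omega⟩
    subst ht
    rw [hsub, testBit_high q r z t (by omega)]
    have hn : n = 2 ^ (z + 1) * q + (2 ^ z + r) := by omega
    rw [hn, testBit_high q (2 ^ z + r) z t (by have := Nat.two_pow_pos z; omega)]

theorem keep_strip (n : Nat) (hn : 0 < n) : ∀ (i : Nat) (B : Int), lowS n < i → 0 ≤ B →
    (B.toNat : Nat) < popc (n % 2 ^ i) →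
    keep n i B = keep (n - 2 ^ lowS n) i B := by
  obtain ⟨hbit, hmod⟩ := lowS_spec n hn
  set z := lowS n with hz
  intro i
  induction i with
  | zero => omega
  | succ i ih =>
    intro B hzi hB hlt
    have hs := pcl_succ n i
    have hs' := pcl_succ (n - 2 ^ z) i
    have htb := testBit_sub hbit
    rcases Nat.lt_or_ge z i with hzi' | hzi'
    · -- z < i : heads agree, recurse
      have hbi : (n - 2 ^ z).testBit i = n.testBit i := by
        rw [htb i]; simp [Nat.ne_of_gt hzi']
      by_cases hb : n.testBit i
      · by_cases hBpos : 0 < B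
        · have hrec : keep n i (B - 1) = keep (n - 2 ^ z) i (B - 1) := by
            apply ih (B - 1) hzi' (by omega)
            rw [hs, hb] at hlt
            simp only [Bool.toNat_true] at hlt
            have hp1 : 0 < popc (n % 2 ^ i) := by
              rcases Nat.eq_zero_or_pos (popc (n % 2 ^ i)) with h0 | h0
              · omega
              · exact h0
            omega
          rw [keep, keep, hbi, hb]
          simp [hBpos, hrec]
        · rw [keep, keep, hbi, hb]
          simp [hBpos]
      · have hb' : n.testBit i = false := by simpa using hb
        rw [keep, keep, hbi, hb']
        simp only [Bool.false_eq_true, if_false]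
        apply ih B hzi' hB
        rw [hs, hb'] at hlt
        simpa using hlt
    · -- z = i : budget must be 0 here, both sides collapse
      have hzi'' : z = i := by omega
      subst hzi''
      have hplow : popc (n % 2 ^ z) = 0 := by rw [hmod, popc_zero]
      rw [hs, hplow, hbit] at hlt
      simp only [Bool.toNat_true] at hlt
      have hB0 : B = 0 := by omega
      subst hB0
      have hb2 : (n - 2 ^ z).testBit z = false := by rw [htb z]; simp
      have hmod2 : (n - 2 ^ z) % 2 ^ z = 0 := by
        obtain ⟨q, hq⟩ := Nat.dvd_sub (Nat.dvd_of_mod_eq_zero hmod) dvd_rfl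
        rw [hq, Nat.mul_mod_right]
      have hL : keep n (z + 1) (0:Int) = (0, 0) := by
        rw [keep, hbit]
        norm_num
      have hR : keep (n - 2 ^ z) (z + 1) (0:Int) = (0, 0) := by
        rw [keep, hb2]
        simp only [Bool.false_eq_true, if_false]
        exact keep_zero_bits _ z 0 hmod2
      rw [hL, hR]

theorem keep_vs_strip : ∀ (k : Nat) (n : Nat) (B : Int), 0 ≤ B → B.toNat + k = popc n →
    n < 2 ^ 31 → (keep n 31 B).1 = stripN k n := by
  intro k
  induction k with
  | zero =>
    intro n B hB hpc hlt
    have hmod : n % 2 ^ 31 = n := Nat.mod_eq_of_lt hlt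
    have : (popc (n % 2 ^ 31) : Int) ≤ B := by rw [hmod]; omega
    rw [keep_ge n 31 B this, stripN, hmod]
  | succ k ih =>
    intro n B hB hpc hlt
    have hnpos : 0 < n := by
      rcases Nat.eq_zero_or_pos n with h0 | h0
      · subst h0; rw [popc_zero] at hpc; omega
      · exact h0
    obtain ⟨hsl, _⟩ := popc_sub_low n hnpos
    have hmod : n % 2 ^ 31 = n := Nat.mod_eq_of_lt hlt
    have hzlt : lowS n < 31 := by
      have h1 : (2:Nat) ^ lowS n ≤ n := Nat.ge_two_pow_of_testBit (lowS_spec n hnpos).1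
      by_contra hc
      have : (2:Nat) ^ 31 ≤ 2 ^ lowS n := Nat.pow_le_pow_right (by omega) (by omega)
      omega
    rw [keep_strip n hnpos 31 B hzlt hB (by rw [hmod]; omega), stripN, strip1 n hnpos]
    apply ih (n - 2 ^ lowS n) B hB (by omega)
    have := Nat.sub_le n (2 ^ lowS n)
    omega

theorem sz_le {n k : Nat} (h : n < 2 ^ k) : sz n ≤ k := by
  induction k generalizing n with
  | zero => interval_cases n; simp [sz]
  | succ k ih =>
    cases n with
    | zero => simp [sz]
    | succ n =>
      rw [sz]
      have h2 : (n + 1) / 2 < 2 ^ k := by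
        have hp := Nat.pow_succ 2 k ▸ h
        omega
      exact Nat.succ_le_succ (ih h2)

theorem range_eq : PySem.List.pyRange 30 (-1) (-1) = rlist 31 := by decide

theorem lowZ_eq : ∀ (b x : Nat), x % 2 ^ b = 2 ^ b - 1 → x.testBit b = false → lowZ x = b := by
  intro b
  induction b with
  | zero =>
    intro x _ h2
    apply lowZ_eq0
    rw [Nat.testBit_eq_decide_div_mod_eq] at h2
    simp at h2
    omega
  | succ b ih =>
    intro x h1 h2
    have hm := mod_two_pow_succ x b
    have hp : (0:Nat) < 2 ^ b := Nat.two_pow_pos _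
    have hpow : (2:Nat) ^ (b + 1) = 2 * 2 ^ b := by ring
    have hsplit : x % (2 * 2 ^ b) = x % 2 + 2 * (x / 2 % 2 ^ b) := Nat.mod_mul
    rw [hpow] at h1
    have hmod2 : x % 2 = 1 := by omega
    rw [lowZ_succ hmod2]
    have hdiv : x / 2 % 2 ^ b = 2 ^ b - 1 := by omega
    have hbit : (x / 2).testBit b = false := by
      rw [← Nat.testBit_succ]; exact h2
    rw [ih (x / 2) hdiv hbit]

theorem altStrip_eq : ∀ (k : Nat) (m : Nat), altStrip k (m : Int) = (stripN k m : Int) := by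
  intro k
  induction k with
  | zero => intro m; rfl
  | succ k ih =>
    intro m
    rw [altStrip, stripN]
    rcases Nat.eq_zero_or_pos m with h0 | h0
    · subst h0
      have e : PySem.Int.band ((0:Nat) : Int) (((0:Nat) : Int) - 1) = ((0 &&& (0 - 1) : Nat) : Int) := by
        rw [PySem.Int.band_comm]
        simpa using PySem.Int.band_neg_one 0
      rw [e, ih]
    · have e1 : ((m : Int) - 1) = ((m - 1 : Nat) : Int) := by omega
      rw [e1, PySem.Int.band_natCast, ih]

theorem altFill_eq : ∀ (k : Nat) (x : Nat), altFill k (x : Int) = (fillN k x : Int) := by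
  intro k
  induction k with
  | zero => intro x; rfl
  | succ k ih =>
    intro x
    rw [altFill, fillN]
    have e1 : ((x : Int) + 1) = ((x + 1 : Nat) : Int) := by push_cast; ring
    have hle : (x + 1) &&& x ≤ x + 1 := Nat.and_le_left
    have e2 : PySem.Int.band ((x + 1 : Nat) : Int) (x : Int) = (((x + 1) &&& x : Nat) : Int) :=
      PySem.Int.band_natCast _ _
    have e3 : ((x + 1 : Nat) : Int) - (((x + 1) &&& x : Nat) : Int)
        = (((x + 1) - ((x + 1) &&& x) : Nat) : Int) := by omega
    rw [e1, e2, e3, PySem.Int.bor_natCast, fillstep x, ih]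

theorem loop1_eq (A : Int) : ∀ (i : Nat) (x : Nat) (B : Int), i ≤ 31 → x % 2 ^ i = 0 →
    solveLoop1 A (rlist i) (x : Int) B
      = (((x + (keep (A % 2147483648).toNat i B).1 : Nat) : Int), (keep (A % 2147483648).toNat i B).2) := by
  intro i
  induction i with
  | zero => intro x B _ _; simp [rlist, solveLoop1, keep]
  | succ i ih =>
    intro x B hi hx
    rw [rlist, solveLoop1]
    have htn : ((i : Int)).toNat = i := Int.toNat_natCast i
    rw [htn]
    have hxbit : x.testBit i = false := testBit_of_mod hx
    have hxmod : x % 2 ^ i = 0 := mod_pow_of_succ hx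
    by_cases hb : ((A % 2147483648).toNat).testBit i
    · rw [if_pos ((bitA A i (by omega)).mpr hb)]
      by_cases hB : 0 < B
      · have hkeep : keep (A % 2147483648).toNat (i + 1) B
            = (2 ^ i + (keep (A % 2147483648).toNat i (B - 1)).1,
               (keep (A % 2147483648).toNat i (B - 1)).2) := by
          rw [keep, hb]; simp [hB]
        rw [if_pos hB, hkeep]
        have e1 : PySem.Int.bor (x : Int) ((1 : Int) <<< i) = ((x + 2 ^ i : Nat) : Int) := by
          rw [shl1, PySem.Int.bor_natCast, or_pow i x (by simp [hxbit])]
        have hx2 : (x + 2 ^ i) % 2 ^ i = 0 := by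
          have h := Nat.add_mod_right x (2 ^ i)
          omega
        rw [e1, ih (x + 2 ^ i) (B - 1) (by omega) hx2]
        simp only [Prod.mk.injEq]
        constructor
        · push_cast; ring
        · trivial
      · have hkeep : keep (A % 2147483648).toNat (i + 1) B = (0, B) := by
          rw [keep, hb]; simp [hB]
        rw [if_neg hB, hkeep]
        simp
    · rw [if_neg (by rw [bitA A i (by omega)]; simp [hb])]
      have hb' : ((A % 2147483648).toNat).testBit i = false := by simpa using hb
      have hkeep : keep (A % 2147483648).toNat (i + 1) B = keep (A % 2147483648).toNat i B := by
        rw [keep, hb']; simp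
      rw [hkeep]
      exact ih x B (by omega) hxmod

theorem loop2_eq : ∀ (fuel : Nat) (x bn : Nat) (B : Int), x % 2 ^ bn = 2 ^ bn - 1 →
    B.toNat + sz (x / 2 ^ bn) ≤ fuel →
    solveLoop2 fuel (x : Int) B ((bn : Nat) : Int) = (fillN B.toNat x : Int) := by
  intro fuel
  induction fuel with
  | zero =>
    intro x bn B _ hf
    have : B.toNat = 0 := by omega
    rw [solveLoop2, this, fillN]
  | succ fuel ih =>
    intro x bn B hinv hf
    rw [solveLoop2]
    by_cases hB : 0 < B
    · rw [if_pos hB]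
      have htn : ((bn : Int)).toNat = bn := Int.toNat_natCast bn
      rw [htn, shl1]
      have hband : PySem.Int.band (x : Int) ((2 ^ bn : Nat) : Int) = ((x &&& 2 ^ bn : Nat) : Int) :=
        PySem.Int.band_natCast _ _
      have hpos : (0:Nat) < 2 ^ bn := Nat.two_pow_pos _
      have hdd : x / 2 ^ bn / 2 = x / 2 ^ (bn + 1) := by
        rw [Nat.div_div_eq_div_mul, pow_succ]
      by_cases hbit : x.testBit bn
      · -- skip a set bit
        have hone : x / 2 ^ bn % 2 = 1 := by
          rw [Nat.testBit_eq_decide_div_mod_eq] at hbit; simpa using hbit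
        rw [hband]
        have hgt : (0:Int) < ((x &&& 2 ^ bn : Nat) : Int) := by
          rw [Nat.and_two_pow, hbit]
          simpa using hpos
        rw [if_pos hgt]
        have hinv' : x % 2 ^ (bn + 1) = 2 ^ (bn + 1) - 1 := by
          have := testBit_true_mod hbit
          have h2 : (2:Nat) ^ (bn + 1) = 2 * 2 ^ bn := by ring
          omega
        have hszd : sz (x / 2 ^ bn) = sz (x / 2 ^ (bn + 1)) + 1 := by
          rw [← hdd]
          rcases h0 : x / 2 ^ bn with _ | m
          · omega
          · rw [sz]
        have e : ((bn : Int) + 1) = (((bn + 1 : Nat)) : Int) := by push_cast; ring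
        rw [e, ih x (bn + 1) B hinv' (by omega)]
      · -- fill the lowest zero bit (= bn)
        have hzero : x / 2 ^ bn % 2 = 0 := by
          rw [Nat.testBit_eq_decide_div_mod_eq] at hbit; simp at hbit; omega
        have hbit' : x.testBit bn = false := by simpa using hbit
        rw [hband]
        have hz : ((x &&& 2 ^ bn : Nat) : Int) = 0 := by
          rw [Nat.and_two_pow, hbit']; simp
        rw [if_neg (by rw [hz]; omega)]
        have hlowz : lowZ x = bn := lowZ_eq bn x hinv hbit'
        have e1 : PySem.Int.bor (x : Int) ((2 ^ bn : Nat) : Int) = ((x + 2 ^ bn : Nat) : Int) := by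
          rw [PySem.Int.bor_natCast, or_pow bn x (by simp [hbit'])]
        rw [e1]
        have hinv' : (x + 2 ^ bn) % 2 ^ (bn + 1) = 2 ^ (bn + 1) - 1 := by
          have hm := testBit_false_mod hbit'
          have h2 : (2:Nat) ^ (bn + 1) = 2 * 2 ^ bn := by ring
          have hdm := Nat.div_add_mod x (2 ^ (bn + 1))
          have : (x + 2 ^ bn) % 2 ^ (bn + 1) = (x % 2 ^ (bn + 1) + 2 ^ bn) % 2 ^ (bn + 1) := by
            conv_lhs => rw [← hdm]
            rw [add_assoc, Nat.mul_add_mod]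
          rw [this, Nat.mod_eq_of_lt (by omega)]
          omega
        have hdiv2 : (x + 2 ^ bn) / 2 ^ (bn + 1) = x / 2 ^ (bn + 1) := by
          have hm := testBit_false_mod hbit'
          have h2 : (2:Nat) ^ (bn + 1) = 2 * 2 ^ bn := by ring
          have hdm := Nat.div_add_mod x (2 ^ (bn + 1))
          have hlt : x % 2 ^ (bn + 1) + 2 ^ bn < 2 ^ (bn + 1) := by omega
          conv_lhs => rw [← hdm]
          rw [add_assoc, Nat.mul_add_div (Nat.two_pow_pos _), Nat.div_eq_of_lt hlt, Nat.add_zero]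
        have hsz' : sz ((x + 2 ^ bn) / 2 ^ (bn + 1)) ≤ sz (x / 2 ^ bn) := by
          rw [hdiv2, ← hdd]
          rcases h0 : x / 2 ^ bn with _ | m
          · simp
          · rw [sz]
            omega
        have hBt : B.toNat = (B - 1).toNat + 1 := by omega
        have e : ((bn : Int) + 1) = (((bn + 1 : Nat)) : Int) := by push_cast; ring
        rw [e, ih (x + 2 ^ bn) (bn + 1) (B - 1) hinv' (by omega), hBt, fillN, hlowz]
    · rw [if_neg hB]
      have : B.toNat = 0 := by omega
      rw [this, fillN]

theorem solve_eq_alt (A B : Int) : solve A B = solve_alt A B := by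
  have h31 : (2:Nat) ^ 31 = 2147483648 := by norm_num
  have hnlt : (A % 2147483648).toNat < 2 ^ 31 := by rw [h31]; omega
  have hz : ((0:Nat) : Int) = 0 := rfl
  have hloop1 := loop1_eq A 31 0 B (by omega) (by simp)
  rw [hz] at hloop1
  simp only [solve, solve_alt, range_eq, hloop1, mask_eq, bitCount_cast, Nat.zero_add]
  by_cases hc : B ≤ ((popc ((A % 2147483648).toNat) : Nat) : Int)
  · rw [if_pos hc]
    have hsnd : (keep (A % 2147483648).toNat 31 B).2 ≤ 0 := by
      apply keep_snd_le
      rw [Nat.mod_eq_of_lt hnlt]; exact hc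
    have hfuel : (keep (A % 2147483648).toNat 31 B).2.toNat + 31
        = ((keep (A % 2147483648).toNat 31 B).2.toNat + 30) + 1 := rfl
    rw [hfuel, solveLoop2, if_neg (by omega), altStrip_eq]
    congr 1
    by_cases hBpos : 0 ≤ B
    · have hmax : max B 0 = B := by omega
      rw [hmax]
      exact keep_vs_strip _ _ B hBpos (by omega) hnlt
    · have hmax : max B 0 = 0 := by omega
      rw [hmax]
      have h1 : (keep (A % 2147483648).toNat 31 B).1 = 0 :=
        keep_nonpos _ 31 B (by omega)
      have h2 : (keep (A % 2147483648).toNat 31 (0:Int)).1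
          = stripN (((popc ((A % 2147483648).toNat) : Nat) : Int) - 0).toNat
              ((A % 2147483648).toNat) :=
        keep_vs_strip _ _ 0 (by omega) (by omega) hnlt
      have h3 : (keep (A % 2147483648).toNat 31 (0:Int)).1 = 0 :=
        keep_nonpos _ 31 0 (by omega)
      rw [h1, ← h2, h3]
  · rw [if_neg hc]
    rw [not_le] at hc
    have hkeep := keep_ge (A % 2147483648).toNat 31 B
      (by rw [Nat.mod_eq_of_lt hnlt]; omega)
    rw [Nat.mod_eq_of_lt hnlt] at hkeep
    rw [hkeep, altFill_eq]
    have hl2 := loop2_eq ((B - ((popc ((A % 2147483648).toNat) : Nat) : Int)).toNat + 31)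
      ((A % 2147483648).toNat) 0 (B - ((popc ((A % 2147483648).toNat) : Nat) : Int))
      (by exact Nat.mod_one _)
      (by
        have hs := sz_le hnlt
        simp only [pow_zero, Nat.div_one]
        omega)
    simpa using hl2

-- ===== VERDICT (by name: the statement is the Claim_ definition above) =====
theorem solve_spec : Claim_equal_solve := by
  intro A B _
  unfold Spec_solve
  exact solve_eq_alt A B
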